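-- pv_equiv track=rewrite | github.com/wxwilcke/hypodisc | hypodisc/langutil.py | combine_regex
-- ===== SOURCE A (Python) =====
-- def combine_regex(subpatterns, subpattern_cluster_list, _pattern='', _i=0):
--     if len(subpatterns) <= 0:
--         return {_pattern+'$'}
--
--     patterns = set()
--     char_pattern = subpatterns[0][:-3]
--     if char_pattern in subpattern_cluster_list[_i].keys():
--         for a,b in subpattern_cluster_list[_i][char_pattern]:
--             if a == b:
--                 length = '{' + str(a) + '}'
--             else:
--                 length = '{' + str(a) + ',' + str(b) + '}'
--
--             if _i <= 0:
--                 pattern = '^' + char_pattern + length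
--             elif char_pattern == "[(\.|\?|!)]":
--                 pattern = _pattern + char_pattern + length
--             else:
--                 pattern = _pattern + '\s' + char_pattern + length
--
--             patterns |= combine_regex(subpatterns[1:], subpattern_cluster_list,
--                                       pattern, _i+1)
--
--     return patterns
-- ===== SOURCE B (Python) =====
-- def _grow(partial, char_pattern, idx, a, b):
--     if a == b:
--         length = '{' + str(a) + '}'
--     else:
--         length = '{' + str(a) + ',' + str(b) + '}'
--     if idx <= 0:
--         return '^' + char_pattern + length
--     if char_pattern == "[(\.|\?|!)]":
--         return partial + char_pattern + length
--     return partial + '\s' + char_pattern + length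
--
--
-- def combine_regex(subpatterns, subpattern_cluster_list, _pattern='', _i=0):
--     # Iterative level-by-level build: carry the list of partial patterns;
--     # the result set is formed once, at the end.
--     partials = [_pattern]
--     for k in range(len(subpatterns)):
--         if not partials:
--             return set()
--         char_pattern = subpatterns[k][:-3]
--         idx = _i + k
--         cluster = subpattern_cluster_list[idx]
--         if char_pattern not in cluster:
--             return set()
--         partials = [_grow(p, char_pattern, idx, a, b)
--                     for p in partials for a, b in cluster[char_pattern]]
--     return {p + '$' for p in partials}
-- ===== Notes on version B (the rewrite author's own statement) =====
-- stated objective: alternative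
-- what changed: Replaces A's recursion (which re-slices the level key and re-unions a set of completed patterns per branch) by a single iterative level-by-level pass that carries the list of partial patterns and forms the result set once at the end.
import Mathlib
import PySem

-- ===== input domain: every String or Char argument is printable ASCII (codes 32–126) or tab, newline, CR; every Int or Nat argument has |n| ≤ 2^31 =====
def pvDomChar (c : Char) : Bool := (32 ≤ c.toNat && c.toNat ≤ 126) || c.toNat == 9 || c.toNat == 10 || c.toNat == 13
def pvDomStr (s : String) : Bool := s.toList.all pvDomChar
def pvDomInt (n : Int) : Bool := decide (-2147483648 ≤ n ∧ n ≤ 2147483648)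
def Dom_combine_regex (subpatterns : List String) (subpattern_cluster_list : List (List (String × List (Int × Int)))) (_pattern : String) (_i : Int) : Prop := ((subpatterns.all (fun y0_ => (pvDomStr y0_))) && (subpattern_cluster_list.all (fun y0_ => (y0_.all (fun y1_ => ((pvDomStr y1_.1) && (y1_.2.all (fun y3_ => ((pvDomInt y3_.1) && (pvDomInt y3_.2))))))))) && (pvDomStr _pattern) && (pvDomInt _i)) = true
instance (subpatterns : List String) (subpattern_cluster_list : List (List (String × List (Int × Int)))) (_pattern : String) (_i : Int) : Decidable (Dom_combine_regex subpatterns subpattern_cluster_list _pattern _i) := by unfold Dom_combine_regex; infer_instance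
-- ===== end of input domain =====

-- ===== PORT A =====
-- Port of A (returns its Python's set as a PySem.Set list; return value only).
def combine_regex (subpatterns : List String) (subpattern_cluster_list : List (List (String × List (Int × Int)))) (_pattern : String) (_i : Int) : List String :=
  match subpatterns with
  | [] => [_pattern ++ "$"]
  | sp :: rest =>
    let char_pattern := PySem.Str.slice sp none (some (-3))
    match PySem.List.pyGet? subpattern_cluster_list _i with
    | none => []  -- Python raises IndexError here; excluded by Pre_combine_regex
    | some cluster =>
      match (PySem.Dict.mk cluster).get? char_pattern with
      | none => PySem.Set.empty
      | some pairs =>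
        pairs.foldl (fun patterns ab =>
          let length := if ab.1 = ab.2 then "{" ++ PySem.Int.toStr ab.1 ++ "}"
            else "{" ++ PySem.Int.toStr ab.1 ++ "," ++ PySem.Int.toStr ab.2 ++ "}"
          let pattern := if _i ≤ 0 then "^" ++ char_pattern ++ length
            else if char_pattern = "[(\\.|\\?|!)]" then _pattern ++ char_pattern ++ length
            else _pattern ++ "\\s" ++ char_pattern ++ length
          PySem.Set.union patterns (combine_regex rest subpattern_cluster_list pattern (_i + 1)))
          PySem.Set.empty

-- ===== PORT B =====
-- Port of B: iterative level-by-level build carrying the list of partial patterns.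
def pvGrow (part char_pattern : String) (idx : Int) (q : Int × Int) : String :=
  let length := if q.1 = q.2 then "{" ++ PySem.Int.toStr q.1 ++ "}"
    else "{" ++ PySem.Int.toStr q.1 ++ "," ++ PySem.Int.toStr q.2 ++ "}"
  if idx ≤ 0 then "^" ++ char_pattern ++ length
  else if char_pattern = "[(\\.|\\?|!)]" then part ++ char_pattern ++ length
  else part ++ "\\s" ++ char_pattern ++ length

def pvCombineGo (subpattern_cluster_list : List (List (String × List (Int × Int)))) (idx : Int) (subs parts : List String) : List String :=
  match subs with
  | [] => PySem.Set.ofList (parts.map (fun p => p ++ "$"))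
  | sp :: more =>
    if parts.isEmpty then PySem.Set.empty
    else
      let char_pattern := PySem.Str.slice sp none (some (-3))
      match PySem.List.pyGet? subpattern_cluster_list idx with
      | none => []  -- Python raises IndexError here; excluded by Pre_combine_regex
      | some cluster =>
        match (PySem.Dict.mk cluster).get? char_pattern with
        | none => PySem.Set.empty
        | some pairs =>
          pvCombineGo subpattern_cluster_list (idx + 1) more
            (parts.flatMap (fun part => pairs.map (pvGrow part char_pattern idx)))

def combine_regex_alt (subpatterns : List String) (subpattern_cluster_list : List (List (String × List (Int × Int)))) (_pattern : String) (_i : Int) : List String :=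
  pvCombineGo subpattern_cluster_list _i subpatterns [_pattern]

-- ===== PRECONDITION & SPEC =====
-- Level j is "passable": the cluster at index _i+j exists, holds subpatterns[j][:-3]
-- as a key, and its pair list is nonempty (otherwise both programs stop there).
def pvLevelOK (subpattern_cluster_list : List (List (String × List (Int × Int)))) (idx : Int) (sp : String) : Bool :=
  match PySem.List.pyGet? subpattern_cluster_list idx with
  | none => false
  | some cluster =>
    match (PySem.Dict.mk cluster).get? (PySem.Str.slice sp none (some (-3))) with
    | none => false
    | some pairs => !pairs.isEmpty

-- Pre_ excludes exactly the inputs where Python A raises IndexError: some level k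
-- whose predecessors are all passable has cluster index _i+k out of range.
def Pre_combine_regex (subpatterns : List String) (subpattern_cluster_list : List (List (String × List (Int × Int)))) (_pattern : String) (_i : Int) : Prop :=
  ∀ k, k < subpatterns.length →
    (∀ j, j < k → pvLevelOK subpattern_cluster_list (_i + (j : Int)) (subpatterns.getD j "") = true) →
    (PySem.List.pyGet? subpattern_cluster_list (_i + (k : Int))).isSome = true
instance (subpatterns : List String) (subpattern_cluster_list : List (List (String × List (Int × Int)))) (_pattern : String) (_i : Int) : Decidable (Pre_combine_regex subpatterns subpattern_cluster_list _pattern _i) := by unfold Pre_combine_regex; infer_instance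

def pvWitness_combine_regex : List String × (List (List (String × List (Int × Int)))) × String × Int :=
  (["ab{1,3}"], [[("ab{1", [(1, 3), (2, 2)])]], "", 0)

def Spec_combine_regex (subpatterns : List String) (subpattern_cluster_list : List (List (String × List (Int × Int)))) (_pattern : String) (_i : Int) (out : List String) : Prop := out = combine_regex_alt subpatterns subpattern_cluster_list _pattern _i
instance (subpatterns : List String) (subpattern_cluster_list : List (List (String × List (Int × Int)))) (_pattern : String) (_i : Int) (out : List String) : Decidable (Spec_combine_regex subpatterns subpattern_cluster_list _pattern _i out) := by unfold Spec_combine_regex; infer_instance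

-- ===== CLAIM (what is proved, stated in full; the proofs are below) =====
def Claim_equal_combine_regex : Prop := ∀ (subpatterns : List String) (subpattern_cluster_list : List (List (String × List (Int × Int)))) (_pattern : String) (_i : Int), Dom_combine_regex subpatterns subpattern_cluster_list _pattern _i → Pre_combine_regex subpatterns subpattern_cluster_list _pattern _i → Spec_combine_regex subpatterns subpattern_cluster_list _pattern _i (combine_regex subpatterns subpattern_cluster_list _pattern _i)

-- ===== LEMMAS AND PROOFS =====
-- The raw (duplicate-keeping) generation sequence both programs dedup, in the
-- shared depth-first order.
def pvRaw (subpattern_cluster_list : List (List (String × List (Int × Int)))) (subs : List String) (p : String) (i : Int) : List String :=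
  match subs with
  | [] => [p ++ "$"]
  | sp :: rest =>
    let char_pattern := PySem.Str.slice sp none (some (-3))
    match PySem.List.pyGet? subpattern_cluster_list i with
    | none => []
    | some cluster =>
      match (PySem.Dict.mk cluster).get? char_pattern with
      | none => []
      | some pairs =>
        pairs.flatMap (fun q => pvRaw subpattern_cluster_list rest (pvGrow p char_pattern i q) (i + 1))

theorem pv_update_add {α : Type} [BEq α] [LawfulBEq α] (s v : PySem.Set α) (y : α) :
    PySem.Set.update s (PySem.Set.add v y) = PySem.Set.add (PySem.Set.update s v) y := by
  by_cases h : y ∈ v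
  · have h1 : PySem.Set.add v y = v := by
      simp [PySem.Set.add, h]
    have h2 : PySem.Set.add (PySem.Set.update s v) y = PySem.Set.update s v := by
      have : y ∈ PySem.Set.update s v := (PySem.Set.mem_update s v y).mpr (Or.inr h)
      simp [PySem.Set.add, PySem.Set.mem_update, h]
    rw [h1, h2]
  · have h1 : PySem.Set.add v y = v ++ [y] := by
      simp only [PySem.Set.add, ite_eq_right_iff]
      intro hc
      exact absurd ((PySem.Set.contains_iff v y).mp hc) h
    rw [h1]
    show List.foldl PySem.Set.add s (v ++ [y]) = PySem.Set.add (PySem.Set.update s v) y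
    rw [List.foldl_append]
    rfl

theorem pv_update_foldl {α : Type} [BEq α] [LawfulBEq α] (ys : List α) :
    ∀ (s v : PySem.Set α),
      PySem.Set.update s (List.foldl PySem.Set.add v ys)
        = PySem.Set.update (PySem.Set.update s v) ys := by
  induction ys with
  | nil => intro s v; rfl
  | cons y ys ih =>
    intro s v
    show PySem.Set.update s (List.foldl PySem.Set.add (PySem.Set.add v y) ys)
        = List.foldl PySem.Set.add (PySem.Set.update s v) (y :: ys)
    rw [ih s (PySem.Set.add v y), List.foldl_cons]
    show PySem.Set.update (PySem.Set.update s (PySem.Set.add v y)) ys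
        = PySem.Set.update (PySem.Set.add (PySem.Set.update s v) y) ys
    rw [pv_update_add]

theorem pv_update_ofList {α : Type} [BEq α] [LawfulBEq α] (s : PySem.Set α) (ys : List α) :
    PySem.Set.update s (PySem.Set.ofList ys) = PySem.Set.update s ys := by
  have h := pv_update_foldl ys s []
  simpa [PySem.Set.ofList, PySem.Set.empty] using h

theorem pv_foldl_union_ofList {α : Type} [BEq α] [LawfulBEq α]
    (f : PySem.Set α → Int × Int → PySem.Set α) (g : Int × Int → List α)
    (hf : ∀ s q, f s q = PySem.Set.union s (PySem.Set.ofList (g q))) :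
    ∀ (l : List (Int × Int)) (acc : List α),
      l.foldl f (PySem.Set.ofList acc) = PySem.Set.ofList (acc ++ l.flatMap g) := by
  intro l
  induction l with
  | nil => intro acc; simp
  | cons a t ih =>
    intro acc
    have h1 : f (PySem.Set.ofList acc) a = PySem.Set.ofList (acc ++ g a) := by
      rw [hf, PySem.Set.ofList_append]
      show PySem.Set.update (PySem.Set.ofList acc) (PySem.Set.ofList (g a))
          = PySem.Set.update (PySem.Set.ofList acc) (g a)
      exact pv_update_ofList _ _
    rw [List.foldl_cons, h1, ih (acc ++ g a), List.flatMap_cons, List.append_assoc]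

theorem pv_ofList_flatMap_nil (parts : List String) :
    PySem.Set.ofList (parts.flatMap (fun _ => ([] : List String))) = [] := by
  have h : parts.flatMap (fun _ => ([] : List String)) = [] := by
    induction parts with
    | nil => rfl
    | cons a t ih => simp [ih]
  rw [h, PySem.Set.ofList_nil]

theorem pv_A_eq_raw :
    ∀ (subs : List String) (cl : List (List (String × List (Int × Int)))) (p : String) (i : Int),
      combine_regex subs cl p i = PySem.Set.ofList (pvRaw cl subs p i) := by
  intro subs
  induction subs with
  | nil =>
    intro cl p i
    simp [combine_regex, pvRaw, PySem.Set.ofList, PySem.Set.add, PySem.Set.empty,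
      PySem.Set.contains]
  | cons sp rest ih =>
    intro cl p i
    cases hget : PySem.List.pyGet? cl i with
    | none => simp [combine_regex, pvRaw, hget]
    | some cluster =>
      cases hkey : (PySem.Dict.mk cluster).get? (PySem.Str.slice sp none (some (-3))) with
      | none => simp [combine_regex, pvRaw, hget, hkey, PySem.Set.empty]
      | some pairs =>
        simp only [combine_regex, pvRaw, hget, hkey]
        have hres := pv_foldl_union_ofList
          (fun patterns ab =>
            let length := if ab.1 = ab.2 then "{" ++ PySem.Int.toStr ab.1 ++ "}"
              else "{" ++ PySem.Int.toStr ab.1 ++ "," ++ PySem.Int.toStr ab.2 ++ "}"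
            let pattern := if i ≤ 0 then "^" ++ PySem.Str.slice sp none (some (-3)) ++ length
              else if PySem.Str.slice sp none (some (-3)) = "[(\\.|\\?|!)]" then
                p ++ PySem.Str.slice sp none (some (-3)) ++ length
              else p ++ "\\s" ++ PySem.Str.slice sp none (some (-3)) ++ length
            PySem.Set.union patterns (combine_regex rest cl pattern (i + 1)))
          (fun q => pvRaw cl rest (pvGrow p (PySem.Str.slice sp none (some (-3))) i q) (i + 1))
          (by intro s q; simp only [pvGrow, ih]) pairs []
        simp only [List.nil_append] at hres
        exact hres

theorem pv_B_eq_raw :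
    ∀ (subs : List String) (cl : List (List (String × List (Int × Int)))) (idx : Int) (parts : List String),
      pvCombineGo cl idx subs parts
        = PySem.Set.ofList (parts.flatMap (fun p => pvRaw cl subs p idx)) := by
  intro subs
  induction subs with
  | nil =>
    intro cl idx parts
    simp [pvCombineGo, pvRaw, List.map_eq_flatMap]
  | cons sp rest ih =>
    intro cl idx parts
    by_cases hp : parts.isEmpty
    · rw [List.isEmpty_iff.mp hp]
      simp [pvCombineGo, PySem.Set.empty]
    · cases hget : PySem.List.pyGet? cl idx with
      | none => simp [pvCombineGo, pvRaw, hp, hget, pv_ofList_flatMap_nil]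
      | some cluster =>
        cases hkey : (PySem.Dict.mk cluster).get? (PySem.Str.slice sp none (some (-3))) with
        | none => simp [pvCombineGo, pvRaw, hp, hget, hkey, PySem.Set.empty, pv_ofList_flatMap_nil]
        | some pairs =>
          simp only [pvCombineGo, pvRaw, hp, hget, hkey, Bool.false_eq_true, if_false]
          rw [ih]
          congr 1
          rw [List.flatMap_assoc]
          congr 1
          funext part
          rw [List.flatMap_map]

-- ===== VERDICT (by name: the statement is the Claim_ definition above) =====
theorem combine_regex_spec : Claim_equal_combine_regex := by
  intro subs cl p i _hdom _hpre
  show combine_regex subs cl p i = combine_regex_alt subs cl p i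
  rw [pv_A_eq_raw, combine_regex_alt, pv_B_eq_raw]
  simp
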